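-- pv_equiv track=rewrite | github.com/Rayyan9477/Agentic-Document-Extraction-PDF | src/config/settings.py | _has_sufficient_entropy
-- ===== SOURCE A (Python) =====
-- def _has_sufficient_entropy(secret: str, min_length: int = 32) -> bool:
--     """Check if secret has sufficient length and character variety."""
--     if len(secret) < min_length:
--         return False
--     # Check for character variety (at least 3 of: upper, lower, digit, special)
--     has_upper = any(c.isupper() for c in secret)
--     has_lower = any(c.islower() for c in secret)
--     has_digit = any(c.isdigit() for c in secret)
--     has_special = any(not c.isalnum() for c in secret)
--     variety_count = sum([has_upper, has_lower, has_digit, has_special])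
--     return variety_count >= 3
-- ===== SOURCE B (Python) =====
-- def _has_sufficient_entropy(secret: str, min_length: int = 32) -> bool:
--     """Check if secret has sufficient length and character variety."""
--     if len(secret) < min_length:
--         return False
--     # One classifying pass: collect the set of category labels present.
--     seen = set()
--     for c in secret:
--         if c.isupper():
--             seen.add('upper')
--         if c.islower():
--             seen.add('lower')
--         if c.isdigit():
--             seen.add('digit')
--         if not c.isalnum():
--             seen.add('special')
--     return len(seen) >= 3
-- ===== Notes on version B (the rewrite author's own statement) =====
-- stated objective: alternative
-- what changed: Replaces four separate any()-scans plus a boolean sum with a single classifying pass over the string that maintains a set of category labels and compares its size to 3.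
import Mathlib
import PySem

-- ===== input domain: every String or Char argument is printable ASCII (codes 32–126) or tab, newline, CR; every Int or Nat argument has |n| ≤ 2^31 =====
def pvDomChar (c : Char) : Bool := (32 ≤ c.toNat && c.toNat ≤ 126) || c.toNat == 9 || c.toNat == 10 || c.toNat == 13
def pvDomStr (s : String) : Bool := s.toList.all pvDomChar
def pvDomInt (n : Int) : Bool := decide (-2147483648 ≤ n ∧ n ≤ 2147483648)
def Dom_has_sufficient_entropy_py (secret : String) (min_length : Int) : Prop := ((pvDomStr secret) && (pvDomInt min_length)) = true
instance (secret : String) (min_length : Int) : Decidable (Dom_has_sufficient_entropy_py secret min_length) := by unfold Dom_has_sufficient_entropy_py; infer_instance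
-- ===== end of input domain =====

-- B replaces A's four any()-scans plus a boolean sum by a single classifying pass
-- maintaining a set of category labels (objective: alternative decomposition, same cost).

-- ===== PORT A =====
def has_sufficient_entropy_py (secret : String) (min_length : Int) : Bool :=
  if PySem.Str.len secret < min_length then false
  else
    let has_upper := secret.toList.any (fun c => PySem.Chars.isupper c)
    let has_lower := secret.toList.any (fun c => PySem.Chars.islower c)
    let has_digit := secret.toList.any (fun c => PySem.Chars.isdigit c)
    let has_special := secret.toList.any (fun c => !PySem.Chars.isalnum c)
    let variety_count : Int :=
      ([has_upper, has_lower, has_digit, has_special].map (fun b => if b then (1 : Int) else 0)).sum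
    decide (variety_count ≥ 3)

-- ===== PORT B =====
-- one classifying step of B's loop body (the four independent ifs)
def entStep (s : PySem.Set String) (c : Char) : PySem.Set String :=
  let s1 := if PySem.Chars.isupper c then PySem.Set.add s "upper" else s
  let s2 := if PySem.Chars.islower c then PySem.Set.add s1 "lower" else s1
  let s3 := if PySem.Chars.isdigit c then PySem.Set.add s2 "digit" else s2
  if !PySem.Chars.isalnum c then PySem.Set.add s3 "special" else s3

def has_sufficient_entropy_py_alt (secret : String) (min_length : Int) : Bool :=
  if PySem.Str.len secret < min_length then false
  else
    let seen := secret.toList.foldl entStep PySem.Set.empty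
    decide (PySem.Set.len seen ≥ 3)

-- ===== PRECONDITION & SPEC =====
def Spec_has_sufficient_entropy_py (secret : String) (min_length : Int) (out : Bool) : Prop := out = has_sufficient_entropy_py_alt secret min_length
instance (secret : String) (min_length : Int) (out : Bool) : Decidable (Spec_has_sufficient_entropy_py secret min_length out) := by unfold Spec_has_sufficient_entropy_py; infer_instance

-- ===== CLAIM (what is proved, stated in full; the proofs are below) =====
def Claim_equal_has_sufficient_entropy_py : Prop := ∀ (secret : String) (min_length : Int), Dom_has_sufficient_entropy_py secret min_length → Spec_has_sufficient_entropy_py secret min_length (has_sufficient_entropy_py secret min_length)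

-- ===== LEMMAS AND PROOFS =====

theorem mem_entStep (s : PySem.Set String) (c : Char) (y : String) :
    y ∈ entStep s c ↔ y ∈ s ∨ (y = "upper" ∧ PySem.Chars.isupper c)
      ∨ (y = "lower" ∧ PySem.Chars.islower c)
      ∨ (y = "digit" ∧ PySem.Chars.isdigit c)
      ∨ (y = "special" ∧ ¬ PySem.Chars.isalnum c) := by
  unfold entStep
  split_ifs <;> simp_all [PySem.Set.mem_add] <;> tauto

theorem nodup_entFold (cs : List Char) (s : PySem.Set String) (hs : s.Nodup) :
    (cs.foldl entStep s).Nodup := by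
  induction cs generalizing s with
  | nil => exact hs
  | cons c cs ih =>
    apply ih
    unfold entStep
    split_ifs <;> repeat' apply PySem.Set.nodup_add
    all_goals assumption

theorem mem_entFold_sub (cs : List Char) (s : PySem.Set String) (y : String)
    (h : y ∈ cs.foldl entStep s) :
    y ∈ s ∨ y ∈ (["upper", "lower", "digit", "special"] : List String) := by
  induction cs generalizing s with
  | nil => exact Or.inl h
  | cons c cs ih =>
    rcases ih _ h with h' | h'
    · rcases (mem_entStep s c y).mp h' with h'' | ⟨rfl, _⟩ | ⟨rfl, _⟩ | ⟨rfl, _⟩ | ⟨rfl, _⟩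
      · exact Or.inl h''
      all_goals simp
    · exact Or.inr h'

theorem mem_entFold_label (cs : List Char) (s : PySem.Set String) (y : String)
    (p : Char → Bool)
    (hy : (y = "upper" ∧ p = fun c => PySem.Chars.isupper c)
        ∨ (y = "lower" ∧ p = fun c => PySem.Chars.islower c)
        ∨ (y = "digit" ∧ p = fun c => PySem.Chars.isdigit c)
        ∨ (y = "special" ∧ p = fun c => !PySem.Chars.isalnum c)) :
    (y ∈ cs.foldl entStep s) ↔ (y ∈ s ∨ cs.any p) := by
  induction cs generalizing s with
  | nil => simp
  | cons c cs ih =>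
    simp only [List.foldl_cons, List.any_cons]
    rw [ih (entStep s c), mem_entStep]
    rcases hy with ⟨rfl, rfl⟩ | ⟨rfl, rfl⟩ | ⟨rfl, rfl⟩ | ⟨rfl, rfl⟩ <;>
      simp <;> tauto

theorem len_entFold (cs : List Char) :
    (cs.foldl entStep PySem.Set.empty).length =
      (if cs.any (fun c => PySem.Chars.isupper c) then 1 else 0)
      + (if cs.any (fun c => PySem.Chars.islower c) then 1 else 0)
      + (if cs.any (fun c => PySem.Chars.isdigit c) then 1 else 0)
      + (if cs.any (fun c => !PySem.Chars.isalnum c) then 1 else 0) := by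
  set S := cs.foldl entStep PySem.Set.empty with hS
  have hnd : S.Nodup := nodup_entFold cs PySem.Set.empty (by simp [PySem.Set.empty])
  have hperm : S.Perm ((["upper", "lower", "digit", "special"] : List String).filter
      (fun x => decide (x ∈ S))) := by
    rw [List.perm_ext_iff_of_nodup hnd]
    · intro a
      simp only [List.mem_filter, decide_eq_true_eq]
      constructor
      · intro ha
        refine ⟨?_, ha⟩
        rcases mem_entFold_sub cs PySem.Set.empty a ha with h | h
        · simp [PySem.Set.empty] at h
        · exact h
      · exact fun h => h.2
    · apply List.Nodup.filter
      decide
  have hu : ("upper" ∈ S) ↔ cs.any (fun c => PySem.Chars.isupper c) := by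
    rw [hS, mem_entFold_label cs _ _ _ (Or.inl ⟨rfl, rfl⟩)]
    simp [PySem.Set.empty]
  have hl : ("lower" ∈ S) ↔ cs.any (fun c => PySem.Chars.islower c) := by
    rw [hS, mem_entFold_label cs _ _ _ (Or.inr (Or.inl ⟨rfl, rfl⟩))]
    simp [PySem.Set.empty]
  have hd : ("digit" ∈ S) ↔ cs.any (fun c => PySem.Chars.isdigit c) := by
    rw [hS, mem_entFold_label cs _ _ _ (Or.inr (Or.inr (Or.inl ⟨rfl, rfl⟩)))]
    simp [PySem.Set.empty]
  have hsp : ("special" ∈ S) ↔ cs.any (fun c => !PySem.Chars.isalnum c) := by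
    rw [hS, mem_entFold_label cs _ _ _ (Or.inr (Or.inr (Or.inr ⟨rfl, rfl⟩)))]
    simp [PySem.Set.empty]
  rw [hperm.length_eq]
  simp only [List.filter, ← hu, ← hl, ← hd, ← hsp]
  by_cases h1 : "upper" ∈ S <;> by_cases h2 : "lower" ∈ S <;>
    by_cases h3 : "digit" ∈ S <;> by_cases h4 : "special" ∈ S <;>
    simp [h1, h2, h3, h4]

-- ===== VERDICT (by name: the statement is the Claim_ definition above) =====
theorem has_sufficient_entropy_py_spec : Claim_equal_has_sufficient_entropy_py := by
  intro secret min_length _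
  unfold Spec_has_sufficient_entropy_py has_sufficient_entropy_py has_sufficient_entropy_py_alt
  split_ifs with h
  · rfl
  · simp only [PySem.Set.len, len_entFold secret.toList]
    by_cases h1 : secret.toList.any (fun c => PySem.Chars.isupper c) <;>
      by_cases h2 : secret.toList.any (fun c => PySem.Chars.islower c) <;>
      by_cases h3 : secret.toList.any (fun c => PySem.Chars.isdigit c) <;>
      by_cases h4 : secret.toList.any (fun c => !PySem.Chars.isalnum c) <;>
      simp [h1, h2, h3, h4]
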